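-- pv_equiv track=rewrite | github.com/marketcalls/openbull | backend/broker/zerodha/mapping/order_data.py | calculate_order_statistics
-- ===== SOURCE A (Python) =====
-- def calculate_order_statistics(order_data: list[dict]) -> dict:
--     """Calculate order statistics from order data."""
--     total_buy_orders = total_sell_orders = 0
--     total_completed_orders = total_open_orders = total_rejected_orders = 0
--
--     for order in order_data:
--         if order.get("transaction_type") == "BUY":
--             total_buy_orders += 1
--         elif order.get("transaction_type") == "SELL":
--             total_sell_orders += 1
--
--         status = order.get("status", "").upper()
--         if status == "COMPLETE":
--             total_completed_orders += 1
--         elif status == "OPEN":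
--             total_open_orders += 1
--         elif status == "REJECTED":
--             total_rejected_orders += 1
--
--     return {
--         "total_buy_orders": total_buy_orders,
--         "total_sell_orders": total_sell_orders,
--         "total_completed_orders": total_completed_orders,
--         "total_open_orders": total_open_orders,
--         "total_rejected_orders": total_rejected_orders,
--     }
-- ===== SOURCE B (Python) =====
-- def calculate_order_statistics(order_data: list[dict]) -> dict:
--     """Calculate order statistics from order data."""
--     transaction_types = [o.get("transaction_type") for o in order_data]
--     statuses = [o.get("status", "").upper() for o in order_data]
--     return {
--         "total_buy_orders": transaction_types.count("BUY"),
--         "total_sell_orders": transaction_types.count("SELL"),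
--         "total_completed_orders": statuses.count("COMPLETE"),
--         "total_open_orders": statuses.count("OPEN"),
--         "total_rejected_orders": statuses.count("REJECTED"),
--     }
-- ===== Notes on version B (the rewrite author's own statement) =====
-- stated objective: idiomatic
-- what changed: Replaced the branchy single-pass accumulator loop with map-then-count: project the transaction types and upper-cased statuses into two lists once, then build the result dict from five list.count lookups, eliminating all if/elif branching.
import Mathlib
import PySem

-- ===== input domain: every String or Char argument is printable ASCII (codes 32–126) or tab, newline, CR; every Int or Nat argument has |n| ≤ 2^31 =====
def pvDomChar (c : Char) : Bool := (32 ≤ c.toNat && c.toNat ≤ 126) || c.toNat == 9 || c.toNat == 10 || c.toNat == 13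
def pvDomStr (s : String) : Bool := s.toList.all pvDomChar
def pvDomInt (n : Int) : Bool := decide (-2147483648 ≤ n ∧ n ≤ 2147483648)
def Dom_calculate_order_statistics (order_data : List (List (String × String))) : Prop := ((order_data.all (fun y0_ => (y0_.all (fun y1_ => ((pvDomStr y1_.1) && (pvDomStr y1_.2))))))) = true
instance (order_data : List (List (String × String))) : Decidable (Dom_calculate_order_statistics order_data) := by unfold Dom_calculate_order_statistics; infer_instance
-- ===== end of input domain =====

-- B replaces the branchy single-pass counter loop with map-then-count lookups (idiomatic; return value only).

-- ===== PORT A =====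
def calculate_order_statistics (order_data : List (List (String × String))) : List (String × Int) :=
  let acc := order_data.foldl (fun acc order =>
    let tb := acc.1; let ts := acc.2.1; let tc := acc.2.2.1; let topen := acc.2.2.2.1; let tr := acc.2.2.2.2
    -- if/elif on order.get("transaction_type")
    let bs : Int × Int :=
      if (PySem.Dict.mk order).get? "transaction_type" == some "BUY" then (tb + 1, ts)
      else if (PySem.Dict.mk order).get? "transaction_type" == some "SELL" then (tb, ts + 1)
      else (tb, ts)
    -- status = order.get("status", "").upper()
    let status := PySem.Str.upper ((PySem.Dict.mk order).getD "status" "")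
    let cor : Int × Int × Int :=
      if status == "COMPLETE" then (tc + 1, topen, tr)
      else if status == "OPEN" then (tc, topen + 1, tr)
      else if status == "REJECTED" then (tc, topen, tr + 1)
      else (tc, topen, tr)
    (bs.1, bs.2, cor.1, cor.2.1, cor.2.2)) (((0 : Int), (0 : Int), (0 : Int), (0 : Int), (0 : Int)))
  [("total_buy_orders", acc.1), ("total_sell_orders", acc.2.1),
   ("total_completed_orders", acc.2.2.1), ("total_open_orders", acc.2.2.2.1),
   ("total_rejected_orders", acc.2.2.2.2)]

-- ===== PORT B =====
def calculate_order_statistics_alt (order_data : List (List (String × String))) : List (String × Int) :=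
  let transaction_types := order_data.map (fun o => (PySem.Dict.mk o).get? "transaction_type")
  let statuses := order_data.map (fun o => PySem.Str.upper ((PySem.Dict.mk o).getD "status" ""))
  [("total_buy_orders", (PySem.List.count transaction_types (some "BUY") : Int)),
   ("total_sell_orders", (PySem.List.count transaction_types (some "SELL") : Int)),
   ("total_completed_orders", (PySem.List.count statuses "COMPLETE" : Int)),
   ("total_open_orders", (PySem.List.count statuses "OPEN" : Int)),
   ("total_rejected_orders", (PySem.List.count statuses "REJECTED" : Int))]

-- ===== PRECONDITION & SPEC =====
def Spec_calculate_order_statistics (order_data : List (List (String × String))) (out : List (String × Int)) : Prop := out = calculate_order_statistics_alt order_data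
instance (order_data : List (List (String × String))) (out : List (String × Int)) : Decidable (Spec_calculate_order_statistics order_data out) := by unfold Spec_calculate_order_statistics; infer_instance

-- ===== CLAIM (what is proved, stated in full; the proofs are below) =====
def Claim_equal_calculate_order_statistics : Prop := ∀ (order_data : List (List (String × String))), Dom_calculate_order_statistics order_data → Spec_calculate_order_statistics order_data (calculate_order_statistics order_data)

-- ===== LEMMAS AND PROOFS =====

-- The branchy loop of port A computes, from any start, the five counts of port B.
lemma loopA_eq (l : List (List (String × String))) :
    ∀ (b s c o r : Int),
      l.foldl (fun acc order =>
        let tb := acc.1; let ts := acc.2.1; let tc := acc.2.2.1; let topen := acc.2.2.2.1; let tr := acc.2.2.2.2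
        let bs : Int × Int :=
          if (PySem.Dict.mk order).get? "transaction_type" == some "BUY" then (tb + 1, ts)
          else if (PySem.Dict.mk order).get? "transaction_type" == some "SELL" then (tb, ts + 1)
          else (tb, ts)
        let status := PySem.Str.upper ((PySem.Dict.mk order).getD "status" "")
        let cor : Int × Int × Int :=
          if status == "COMPLETE" then (tc + 1, topen, tr)
          else if status == "OPEN" then (tc, topen + 1, tr)
          else if status == "REJECTED" then (tc, topen, tr + 1)
          else (tc, topen, tr)
        (bs.1, bs.2, cor.1, cor.2.1, cor.2.2)) (b, s, c, o, r)
      = (b + (l.countP (fun od => (PySem.Dict.mk od).get? "transaction_type" == some "BUY") : Int),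
         s + (l.countP (fun od => (PySem.Dict.mk od).get? "transaction_type" == some "SELL") : Int),
         c + (l.countP (fun od => PySem.Str.upper ((PySem.Dict.mk od).getD "status" "") == "COMPLETE") : Int),
         o + (l.countP (fun od => PySem.Str.upper ((PySem.Dict.mk od).getD "status" "") == "OPEN") : Int),
         r + (l.countP (fun od => PySem.Str.upper ((PySem.Dict.mk od).getD "status" "") == "REJECTED") : Int)) := by
  induction l with
  | nil => intro b s c o r; simp
  | cons hd tl ih =>
    intro b s c o r
    simp only [List.foldl_cons, List.countP_cons]
    rw [ih]
    by_cases h1 : (PySem.Dict.mk hd).get? "transaction_type" == some "BUY" <;>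
      by_cases h2 : (PySem.Dict.mk hd).get? "transaction_type" == some "SELL" <;>
      by_cases h3 : PySem.Str.upper ((PySem.Dict.mk hd).getD "status" "") == "COMPLETE" <;>
      by_cases h4 : PySem.Str.upper ((PySem.Dict.mk hd).getD "status" "") == "OPEN" <;>
      by_cases h5 : PySem.Str.upper ((PySem.Dict.mk hd).getD "status" "") == "REJECTED" <;>
      first
        | (simp [h1, h2, h3, h4, h5, Prod.ext_iff]; omega)
        | (clear ih; simp_all [beq_iff_eq])


-- ===== VERDICT (by name: the statement is the Claim_ definition above) =====
theorem calculate_order_statistics_spec : Claim_equal_calculate_order_statistics := by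
  intro order_data _
  unfold Spec_calculate_order_statistics calculate_order_statistics calculate_order_statistics_alt
  simp only [loopA_eq, PySem.List.count_eq, zero_add]
  simp [List.count_eq_countP, List.countP_map, Function.comp_def]
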